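-- pv_equiv track=rewrite | github.com/kzyma/blocksWorld_AgentJ | createWorld_BW.py | destsOf
-- ===== SOURCE A (Python) =====
-- from copy import copy
--
-- def destsOf(cfg):
--         rr=[x for x in range(len(cfg))]
--         mList=[]
--         for indx in range(len(cfg)):
--                 irr = copy(rr)
--                 irr[indx]=-1
--                 mList.append(irr)
--         return mList
-- ===== SOURCE B (Python) =====
-- def destsOf(cfg):
--     # Grow the matrix incrementally: when enlarging from k to k+1 rows, every
--     # existing row gains the new column value k in place, and one new row
--     # [0..k-1, -1] is appended.  No template row is copied and no cell is
--     # computed from a diagonal test.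
--     m = []
--     for k in range(len(cfg)):
--         for r in m:
--             r.append(k)
--         m.append(list(range(k)) + [-1])
--     return m
-- ===== Notes on version B (the rewrite author's own statement) =====
-- stated objective: alternative
-- what changed: B builds the matrix incrementally (dynamic-programming style): at step k it appends the new column value k to every existing row in place and adds one new row [0..k-1,-1], instead of A's copy-a-template-row-then-overwrite-one-cell loop.
import Mathlib
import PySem

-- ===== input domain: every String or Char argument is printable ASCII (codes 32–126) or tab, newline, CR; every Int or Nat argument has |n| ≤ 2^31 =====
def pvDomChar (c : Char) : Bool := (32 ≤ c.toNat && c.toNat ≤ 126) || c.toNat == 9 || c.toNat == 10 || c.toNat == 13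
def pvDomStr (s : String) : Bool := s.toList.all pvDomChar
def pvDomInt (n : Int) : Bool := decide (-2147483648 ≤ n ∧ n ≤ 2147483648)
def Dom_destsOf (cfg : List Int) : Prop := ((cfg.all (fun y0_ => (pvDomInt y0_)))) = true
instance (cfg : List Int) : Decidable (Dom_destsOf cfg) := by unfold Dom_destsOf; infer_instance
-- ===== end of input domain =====

-- B builds the matrix incrementally (append column k to every row, then add row
-- [0..k-1,-1]) instead of A's copy-a-template-row-and-overwrite-one-cell loop;
-- objective: alternative decomposition, same cost.

-- ===== PORT A =====
-- rr = [x for x in range(len(cfg))]; for indx in range(len cfg): irr = copy(rr); irr[indx] = -1; mList.append(irr)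
def destsOf (cfg : List Int) : List (List Int) :=
  let rr : List Int := (PySem.List.pyRange 0 (cfg.length : Int) 1)
  (PySem.List.pyRange 0 (cfg.length : Int) 1).foldl
    (fun mList indx => mList ++ [rr.set indx.toNat (-1)]) []
  -- 'irr[indx] = -1' with 0 ≤ indx < len rr is exactly List.set indx.toNat

-- ===== PORT B =====
-- m = []; for k in range(len(cfg)): (r.append(k) for each r in m); m.append(list(range(k)) + [-1])
def destsOf_alt (cfg : List Int) : List (List Int) :=
  (List.range cfg.length).foldl
    (fun (m : List (List Int)) (k : Nat) => m.map (fun r => r ++ [(k : Int)])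
                ++ [((List.range k).map (fun (j : Nat) => (j : Int))) ++ [(-1 : Int)]]) []

-- ===== PRECONDITION & SPEC =====
def Spec_destsOf (cfg : List Int) (out : List (List Int)) : Prop := out = destsOf_alt cfg
instance (cfg : List Int) (out : List (List Int)) : Decidable (Spec_destsOf cfg out) := by unfold Spec_destsOf; infer_instance

-- ===== CLAIM (what is proved, stated in full; the proofs are below) =====
def Claim_equal_destsOf : Prop := ∀ (cfg : List Int), Dom_destsOf cfg → Spec_destsOf cfg (destsOf cfg)

-- ===== LEMMAS AND PROOFS =====
-- the integer row [0,1,…,n-1]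
def pvRow (n : Nat) : List Int := (List.range n).map (fun (j : Nat) => (j : Int))

theorem pvRow_succ (n : Nat) : pvRow (n + 1) = pvRow n ++ [(n : Int)] := by
  simp [pvRow, List.range_succ]

theorem pv_set_append_left (l l' : List Int) (i : Nat) (h : i < l.length) (a : Int) :
    (l ++ l').set i a = l.set i a ++ l' := by
  apply List.ext_getElem
  · simp
  · intro k h1 h2
    by_cases hk : k = i <;>
      simp [List.getElem_set, List.getElem_append, hk, h]

theorem pv_set_last (l : List Int) (a : Int) :
    (l ++ [a]).set l.length (-1) = l ++ [(-1 : Int)] := by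
  apply List.ext_getElem
  · simp
  · intro k h1 h2
    by_cases hk : k = l.length
    · simp [hk]
    · have hk' : k < l.length := by simp at h1; omega
      simp [hk']

-- B's fold computes exactly A's list of patched rows
theorem pv_alt_closed (n : Nat) :
    (List.range n).foldl
      (fun (m : List (List Int)) (k : Nat) => m.map (fun r => r ++ [(k : Int)])
                ++ [((List.range k).map (fun (j : Nat) => (j : Int))) ++ [(-1 : Int)]]) []
    = (List.range n).map (fun i => (pvRow n).set i (-1)) := by
  induction n with
  | zero => simp
  | succ n ih =>
    rw [List.range_succ, List.foldl_append, ih, List.map_append]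
    simp only [List.foldl_cons, List.foldl_nil, List.map_map, List.map_cons, List.map_nil]
    congr 1
    · apply List.map_congr_left
      intro i hi
      have hilt : i < n := List.mem_range.mp hi
      have : i < (pvRow n).length := by simp [pvRow]; omega
      simp only [Function.comp_apply, pvRow_succ]
      rw [pv_set_append_left _ _ _ this]
    · have := pv_set_last (pvRow n) (n : Int)
      simp only [pvRow_succ]
      rw [show (pvRow n).length = n by simp [pvRow]] at this
      simp [pvRow] at this ⊢

theorem pv_foldl_append_map {α β : Type} (f : α → β) (l : List α) (acc : List β) :
    l.foldl (fun m x => m ++ [f x]) acc = acc ++ l.map f := by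
  induction l generalizing acc with
  | nil => simp
  | cons x xs ih => simp [ih]

-- ===== VERDICT (by name: the statement is the Claim_ definition above) =====
theorem destsOf_spec : Claim_equal_destsOf := by
  intro cfg _
  show destsOf cfg = destsOf_alt cfg
  unfold destsOf destsOf_alt
  rw [pv_alt_closed]
  simp only [PySem.List.pyRange_zero_nat, pv_foldl_append_map, List.nil_append, List.map_map]
  apply List.map_congr_left
  intro i hi
  simp [pvRow]
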